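-- pv_equiv track=rewrite | github.com/shuafriedman/advent_of_code | 2024/4.py | check_adjacent_for_next_letter
-- ===== SOURCE A (Python) =====
-- def check_adjacent_for_next_letter(
--     cur_pos:tuple, amount_of_cols, amount_of_lines
--     ):
--     found = {}
--     #up
--     found["up"] = (cur_pos[0] - 1, cur_pos[1]) if cur_pos[0] !=0 else None
--     #down
--     found["down"] = (cur_pos[0]+1, cur_pos[1]) if cur_pos[0] != amount_of_cols-1 else None
--     #right
--     found["right"] = (cur_pos[0], cur_pos[1]+1) if cur_pos[1] != amount_of_lines-1 else None
--     #left
--     found["left"] = (cur_pos[0], cur_pos[1]-1) if cur_pos[1] != 0 else None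
--     #up_left
--     if found["up"] is not None and found["left"] is not None:
--         found["up_left"] = (found["up"][0], found["left"][1])
--     else:
--         found["up_left"] = None
--
--     # up_right
--     if found["up"] is not None and found["right"] is not None:
--         found["up_right"] = (found["up"][0], found["right"][1])
--     else:
--         found["up_right"] = None
--
--     # down_left
--     if found["down"] is not None and found["left"] is not None:
--         found["down_left"] = (found["down"][0], found["left"][1])
--     else:
--         found["down_left"] = None
--
--     # down_right
--     if found["down"] is not None and found["right"] is not None:
--         found["down_right"] = (found["down"][0], found["right"][1])
--     else:
--         found["down_right"] = None
--     return {key: val for key,val in found.items() if val}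
-- ===== SOURCE B (Python) =====
-- def check_adjacent_for_next_letter(cur_pos, amount_of_cols, amount_of_lines):
--     r, c = cur_pos
--     # component lists: which vertical / horizontal steps stay off a forbidden boundary
--     vert = [("up", -1)] * (r != 0) + [("down", 1)] * (r != amount_of_cols - 1)
--     horiz = [("left", -1)] * (c != 0) + [("right", 1)] * (c != amount_of_lines - 1)
--     out = {name: (r + dr, c) for name, dr in vert}
--     for name, dc in reversed(horiz):
--         out[name] = (r, c + dc)
--     for vn, dr in vert:
--         for hn, dc in horiz:
--             out[f"{vn}_{hn}"] = (r + dr, c + dc)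
--     return out
-- ===== Notes on version B (the rewrite author's own statement) =====
-- stated objective: simpler
-- what changed: B performs the 4 boundary checks only once to build vertical and horizontal component lists and derives the four diagonals as their cross product, instead of A's eight individually guarded entries (cardinals as Optionals, diagonals assembled from them, then a truthiness filter).
import Mathlib
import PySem

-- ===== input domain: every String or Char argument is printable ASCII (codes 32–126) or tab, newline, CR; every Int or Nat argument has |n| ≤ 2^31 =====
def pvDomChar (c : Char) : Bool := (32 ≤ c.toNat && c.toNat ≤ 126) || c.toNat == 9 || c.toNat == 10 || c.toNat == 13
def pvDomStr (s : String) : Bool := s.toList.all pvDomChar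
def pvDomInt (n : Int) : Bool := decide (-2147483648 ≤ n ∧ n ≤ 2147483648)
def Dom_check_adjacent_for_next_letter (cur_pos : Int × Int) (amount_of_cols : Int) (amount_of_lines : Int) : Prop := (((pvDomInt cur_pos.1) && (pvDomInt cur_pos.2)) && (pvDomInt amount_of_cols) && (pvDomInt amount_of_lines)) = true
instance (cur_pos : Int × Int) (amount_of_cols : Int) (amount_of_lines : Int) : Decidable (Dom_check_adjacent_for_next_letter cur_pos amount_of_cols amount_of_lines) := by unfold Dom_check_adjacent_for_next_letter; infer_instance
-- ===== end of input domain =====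

-- B builds two boundary-filtered component lists (vertical, horizontal) and forms the four
-- diagonals as their cross product, replacing A's eight individually guarded entries
-- (objective: simpler); return values are equal everywhere.

-- ===== PORT A =====
-- Literal port of A: builds the dict `found` of Optional positions in insertion order
-- (up, down, right, left, then the four diagonals derived from the cardinals); the final
-- dict comprehension `{k: v for k,v in found.items() if val}` keeps exactly the non-None
-- entries (a 2-tuple is always truthy, so `if val` drops exactly None).
def check_adjacent_for_next_letter (cur_pos : Int × Int) (amount_of_cols : Int) (amount_of_lines : Int) : List (String × Int × Int) :=
  let up : Option (Int × Int) := if cur_pos.1 ≠ 0 then some (cur_pos.1 - 1, cur_pos.2) else none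
  let down : Option (Int × Int) := if cur_pos.1 ≠ amount_of_cols - 1 then some (cur_pos.1 + 1, cur_pos.2) else none
  let right : Option (Int × Int) := if cur_pos.2 ≠ amount_of_lines - 1 then some (cur_pos.1, cur_pos.2 + 1) else none
  let left : Option (Int × Int) := if cur_pos.2 ≠ 0 then some (cur_pos.1, cur_pos.2 - 1) else none
  let up_left : Option (Int × Int) := match up, left with
    | some u, some l => some (u.1, l.2)
    | _, _ => none
  let up_right : Option (Int × Int) := match up, right with
    | some u, some rt => some (u.1, rt.2)
    | _, _ => none
  let down_left : Option (Int × Int) := match down, left with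
    | some d, some l => some (d.1, l.2)
    | _, _ => none
  let down_right : Option (Int × Int) := match down, right with
    | some d, some rt => some (d.1, rt.2)
    | _, _ => none
  let found : List (String × Option (Int × Int)) :=
    [("up", up), ("down", down), ("right", right), ("left", left),
     ("up_left", up_left), ("up_right", up_right),
     ("down_left", down_left), ("down_right", down_right)]
  found.filterMap (fun kv => kv.2.map (fun v => (kv.1, v)))

-- ===== PORT B =====
-- Literal port of Source B. `[x] * bool` is the empty or singleton list, i.e. an if-then-else;
-- all emitted keys are distinct, so Python dict insertion order = list append, and the three
-- insertion stages become three concatenated segments; the nested diagonal loop is flatMap.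
def check_adjacent_for_next_letter_alt (cur_pos : Int × Int) (amount_of_cols : Int) (amount_of_lines : Int) : List (String × Int × Int) :=
  let r := cur_pos.1
  let c := cur_pos.2
  let vert : List (String × Int) :=
    (if r ≠ 0 then [("up", (-1 : Int))] else []) ++
    (if r ≠ amount_of_cols - 1 then [("down", (1 : Int))] else [])
  let horiz : List (String × Int) :=
    (if c ≠ 0 then [("left", (-1 : Int))] else []) ++
    (if c ≠ amount_of_lines - 1 then [("right", (1 : Int))] else [])
  (vert.map (fun p => (p.1, r + p.2, c))) ++
  (horiz.reverse.map (fun p => (p.1, r, c + p.2))) ++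
  (vert.flatMap (fun v => horiz.map (fun h => (v.1 ++ "_" ++ h.1, r + v.2, c + h.2))))

-- ===== PRECONDITION & SPEC =====
def Spec_check_adjacent_for_next_letter (cur_pos : Int × Int) (amount_of_cols : Int) (amount_of_lines : Int) (out : List (String × Int × Int)) : Prop := out = check_adjacent_for_next_letter_alt cur_pos amount_of_cols amount_of_lines
instance (cur_pos : Int × Int) (amount_of_cols : Int) (amount_of_lines : Int) (out : List (String × Int × Int)) : Decidable (Spec_check_adjacent_for_next_letter cur_pos amount_of_cols amount_of_lines out) := by unfold Spec_check_adjacent_for_next_letter; infer_instance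

-- ===== CLAIM =====
def Claim_equal_check_adjacent_for_next_letter : Prop := ∀ (cur_pos : Int × Int) (amount_of_cols : Int) (amount_of_lines : Int), Dom_check_adjacent_for_next_letter cur_pos amount_of_cols amount_of_lines → Spec_check_adjacent_for_next_letter cur_pos amount_of_cols amount_of_lines (check_adjacent_for_next_letter cur_pos amount_of_cols amount_of_lines)

-- ===== LEMMAS AND PROOFS =====
set_option maxHeartbeats 2000000 in
theorem pvAB_eq (r c amount_of_cols amount_of_lines : Int) :
    check_adjacent_for_next_letter (r, c) amount_of_cols amount_of_lines =
      check_adjacent_for_next_letter_alt (r, c) amount_of_cols amount_of_lines := by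
  simp only [check_adjacent_for_next_letter, check_adjacent_for_next_letter_alt]
  split_ifs <;> simp_all <;> omega

-- ===== VERDICT =====
theorem check_adjacent_for_next_letter_spec : Claim_equal_check_adjacent_for_next_letter := by
  intro cur_pos amount_of_cols amount_of_lines _
  obtain ⟨r, c⟩ := cur_pos
  unfold Spec_check_adjacent_for_next_letter
  exact pvAB_eq r c amount_of_cols amount_of_lines
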